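-- pv_equiv track=rewrite | github.com/zachzastrow123/FetchRewardsAssessment | Assessment.py | solve_word
-- ===== SOURCE A (Python) =====
-- def solve_word(word):
--     counts = {}
--     visited_chars = []
--
--     for char in word:
--         if char not in visited_chars:
--             num_occurrences = str(word.count(char))
--             if num_occurrences in counts:
--                 return False
--             else:
--                 counts[num_occurrences] = char
--                 visited_chars.append(char)
--
--     for i in range(len(counts)):
--         if str(i+1) not in counts:
--             return False
--
--     return True
-- ===== SOURCE B (Python) =====
-- def solve_word(word):
--     counts = sorted(word.count(c) for c in dict.fromkeys(word))
--     return counts == list(range(1, len(counts) + 1))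
-- ===== Notes on version B (the rewrite author's own statement) =====
-- stated objective: simpler
-- what changed: Replaced A's dict keyed by stringified counts plus a per-integer membership loop with a single sort of the distinct-character frequency list compared against the consecutive range 1..k (distinctness is enforced implicitly by the equality).
import Mathlib
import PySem

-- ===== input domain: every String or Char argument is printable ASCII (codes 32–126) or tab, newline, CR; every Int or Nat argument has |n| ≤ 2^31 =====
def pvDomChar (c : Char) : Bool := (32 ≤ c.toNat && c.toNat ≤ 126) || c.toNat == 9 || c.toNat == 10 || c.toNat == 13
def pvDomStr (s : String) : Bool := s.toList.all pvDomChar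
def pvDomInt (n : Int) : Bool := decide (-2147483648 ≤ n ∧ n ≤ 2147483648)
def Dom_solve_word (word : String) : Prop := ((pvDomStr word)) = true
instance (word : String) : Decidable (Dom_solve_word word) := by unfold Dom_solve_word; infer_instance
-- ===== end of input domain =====

-- B replaces A's dict keyed by stringified counts + per-integer membership loop with
-- "sorted distinct-char frequencies = [1..k]" (simpler; same asymptotic cost).


-- ===== PORT A =====
-- first loop of A: returns none at the early 'return False' (duplicate frequency key),
-- otherwise the final counts dict.  word.count(char) has a single-character needle here,
-- so it is exactly the list count of that character.
def solveLoopA (w : List Char) : List Char → PySem.Dict String Char → List Char → Option (PySem.Dict String Char)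
  | [], counts, _ => some counts
  | char :: rest, counts, visited =>
    if visited.contains char then
      solveLoopA w rest counts visited
    else
      if counts.contains (PySem.Int.toStr (w.count char : Int)) then none
      else solveLoopA w rest (counts.insert (PySem.Int.toStr (w.count char : Int)) char) (visited ++ [char])

def solve_word (word : String) : Bool :=
  match solveLoopA word.toList word.toList PySem.Dict.empty [] with
  | none => false
  | some counts =>
      (PySem.List.pyRange 0 (counts.size : Int) 1).all
        (fun i => counts.contains (PySem.Int.toStr (i + 1)))

-- ===== PORT B =====
def solve_word_alt (word : String) : Bool :=
  let counts := PySem.List.sorted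
      ((PySem.List.dedup word.toList).map (fun c => (word.toList.count c : Int)))
      (fun x => x) false
  counts == PySem.List.pyRange 1 ((counts.length : Int) + 1) 1

-- ===== PRECONDITION & SPEC =====
def Spec_solve_word (word : String) (out : Bool) : Prop := out = solve_word_alt word
instance (word : String) (out : Bool) : Decidable (Spec_solve_word word out) := by unfold Spec_solve_word; infer_instance

-- ===== CLAIM (what is proved, stated in full; the proofs are below) =====
def Claim_equal_solve_word : Prop := ∀ (word : String), Dom_solve_word word → Spec_solve_word word (solve_word word)

-- ===== LEMMAS AND PROOFS =====

-- ---- str(n) is injective on nonnegative integers ----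
lemma toDigitsCore_shift (b : Nat) : ∀ (fuel n : Nat) (l : List Char),
    Nat.toDigitsCore b fuel n l = Nat.toDigitsCore b fuel n [] ++ l := by
  intro fuel
  induction fuel with
  | zero => intro n l; simp [Nat.toDigitsCore]
  | succ f ih =>
    intro n l
    simp only [Nat.toDigitsCore]
    by_cases h : n / b = 0
    · simp [h]
    · rw [if_neg h, if_neg h, ih (n / b) ((n % b).digitChar :: l),
        ih (n / b) [(n % b).digitChar], List.append_assoc, List.singleton_append]

lemma toDigitsCore_fuel (b : Nat) (hb : 2 ≤ b) : ∀ (n f f' : Nat) (l : List Char),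
    n < f → n < f' → Nat.toDigitsCore b f n l = Nat.toDigitsCore b f' n l := by
  intro n
  induction n using Nat.strong_induction_on with
  | _ n ih =>
    intro f f' l hf hf'
    cases f with
    | zero => omega
    | succ f =>
    cases f' with
    | zero => omega
    | succ f' =>
      simp only [Nat.toDigitsCore]
      by_cases h : n / b = 0
      · simp [h]
      · rw [if_neg h, if_neg h]
        have hn0 : n ≠ 0 := by rintro rfl; simp at h
        have hnb : n / b < n := Nat.div_lt_self (Nat.pos_of_ne_zero hn0) (by omega)
        exact ih (n / b) hnb f f' _ (by omega) (by omega)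

def numOf (l : List Char) : Nat := l.foldl (fun a c => a * 10 + (c.toNat - 48)) 0

lemma digitChar_toNat (d : Nat) (h : d < 10) : (Nat.digitChar d).toNat = 48 + d := by
  interval_cases d <;> rfl

lemma numOf_toDigits : ∀ (n : Nat), numOf (Nat.toDigits 10 n) = n := by
  intro n
  induction n using Nat.strong_induction_on with
  | _ n ih =>
    show numOf (Nat.toDigitsCore 10 (n + 1) n []) = n
    simp only [Nat.toDigitsCore]
    by_cases h : n / 10 = 0
    · rw [if_pos h]
      have hn : n < 10 := by omega
      simp [numOf, Nat.mod_eq_of_lt hn, digitChar_toNat n hn]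
    · rw [if_neg h]
      have hnb : n / 10 < n := Nat.div_lt_self (by omega) (by omega)
      rw [toDigitsCore_shift, toDigitsCore_fuel 10 (by omega) (n / 10) n (n / 10 + 1) []
        (by omega) (by omega)]
      have : numOf (Nat.toDigits 10 (n / 10) ++ [(n % 10).digitChar])
          = numOf (Nat.toDigits 10 (n / 10)) * 10 + (n % 10) := by
        simp [numOf, List.foldl_append, digitChar_toNat (n % 10) (by omega)]
      rw [show Nat.toDigitsCore 10 (n / 10 + 1) (n / 10) [] = Nat.toDigits 10 (n / 10) from rfl,
        this, ih (n / 10) hnb]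
      omega

lemma toStr_nonneg_inj (a b : Int) (ha : 0 ≤ a) (hb : 0 ≤ b)
    (h : PySem.Int.toStr a = PySem.Int.toStr b) : a = b := by
  have h2 : PySem.Int.toChars a = PySem.Int.toChars b := by
    have := congrArg String.toList h
    simpa [PySem.Int.toStr, String.toList_ofList] using this
  simp only [PySem.Int.toChars, if_neg (by omega : ¬ a < 0), if_neg (by omega : ¬ b < 0)] at h2
  have := congrArg numOf h2
  rw [numOf_toDigits, numOf_toDigits] at this
  omega

-- ---- the distinct characters A's first loop actually processes, in order ----
def freshChars (visited : List Char) : List Char → List Char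
  | [] => []
  | c :: rest => if visited.contains c then freshChars visited rest
                 else c :: freshChars (visited ++ [c]) rest

lemma mem_freshChars : ∀ (l visited : List Char) (c : Char),
    c ∈ freshChars visited l ↔ c ∈ l ∧ c ∉ visited := by
  intro l
  induction l with
  | nil => simp [freshChars]
  | cons a rest ih =>
    intro visited c
    simp only [freshChars]
    by_cases hv : visited.contains a
    · rw [if_pos hv, ih]
      simp only [List.contains_eq_mem, decide_eq_true_eq] at hv
      constructor
      · rintro ⟨h1, h2⟩; exact ⟨List.mem_cons_of_mem 
 _ h1, h2⟩
      · rintro ⟨h1, h2⟩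
        rcases List.mem_cons.1 h1 with rfl | h1
        · exact absurd hv h2
        · exact ⟨h1, h2⟩
    · rw [if_neg hv]
      simp only [List.contains_eq_mem, decide_eq_true_eq] at hv
      simp only [List.mem_cons, ih, List.mem_append]
      by_cases hc : c = a
      · subst hc; tauto
      · tauto

lemma nodup_freshChars : ∀ (l visited : List Char), (freshChars visited l).Nodup := by
  intro l
  induction l with
  | nil => intro v; simp [freshChars]
  | cons a rest ih =>
    intro visited
    simp only [freshChars]
    split
    · exact ih visited
    · refine List.nodup_cons.2 ⟨?_, ih _⟩
      intro hmem
      rw [mem_freshChars] at hmem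
      exact hmem.2 (by simp)

-- A's loop = a plain fold over the fresh distinct characters
def foldD (w : List Char) : List Char → PySem.Dict String Char → Option (PySem.Dict String Char)
  | [], counts => some counts
  | char :: rest, counts =>
    if counts.contains (PySem.Int.toStr (w.count char : Int)) then none
    else foldD w rest (counts.insert (PySem.Int.toStr (w.count char : Int)) char)

lemma solveLoopA_eq_foldD (w : List Char) : ∀ (l visited : List Char) (d : PySem.Dict String Char),
    solveLoopA w l d visited = foldD w (freshChars visited l) d := by
  intro l
  induction l with
  | nil => intro v d; rfl
  | cons a rest ih =>
    intro visited d
    simp only [solveLoopA, freshChars]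
    by_cases hv : visited.contains a
    · rw [if_pos hv, if_pos hv, ih]
    · rw [if_neg hv, if_neg hv]
      simp only [foldD]
      by_cases hc : d.contains (PySem.Int.toStr (w.count a : Int))
      · rw [if_pos hc, if_pos hc]
      · rw [if_neg hc, if_neg hc, ih]

lemma foldD_eq (w : List Char) : ∀ (l : List Char) (d : PySem.Dict String Char),
    foldD w l d =
      if (∀ c ∈ l, d.contains (PySem.Int.toStr (w.count c : Int)) = false)
          ∧ (l.map (fun c => PySem.Int.toStr (w.count c : Int))).Nodup then
        some (l.foldl (fun d c => d.insert (PySem.Int.toStr (w.count c : Int)) c) d)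
      else none := by
  intro l
  induction l with
  | nil => intro d; simp [foldD]
  | cons a rest ih =>
    intro d
    simp only [foldD, List.foldl_cons, List.map_cons, List.nodup_cons]
    by_cases hc : d.contains (PySem.Int.toStr (w.count a : Int))
    · rw [if_pos hc, if_neg]
      rintro ⟨h1, -⟩
      exact absurd (h1 a (by simp)) (by simp [hc])
    · rw [if_neg hc, ih]
      rw [Bool.not_eq_true] at hc
      have h : ((∀ c ∈ rest, (d.insert (PySem.Int.toStr (w.count a : Int)) a).contains
              (PySem.Int.toStr (w.count c : Int)) = false)
            ∧ (rest.map (fun c => PySem.Int.toStr (w.count c : Int))).Nodup)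
          ↔ ((∀ c ∈ a :: rest, d.contains (PySem.Int.toStr (w.count c : Int)) = false)
            ∧ ((PySem.Int.toStr (w.count a : Int)) ∉
                rest.map (fun c => PySem.Int.toStr (w.count c : Int))
              ∧ (rest.map (fun c => PySem.Int.toStr (w.count c : Int))).Nodup)) := by
        simp only [PySem.Dict.contains_insert, Bool.or_eq_false_iff, beq_eq_false_iff_ne,
          List.mem_map, not_exists, List.forall_mem_cons, hc, true_and, not_and]
        constructor
        · rintro ⟨h1, h2⟩
          exact ⟨fun c hcm => (h1 c hcm).2, fun c hcm heq => absurd heq (h1 c hcm).1, h2⟩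
        · rintro ⟨h1, h2, h3⟩
          exact ⟨fun c hcm => ⟨fun heq => h2 c hcm heq, h1 c hcm⟩, h3⟩
      exact if_congr h rfl rfl

-- ---- pyRange 1 (k+1) is the casted Nat range ----
lemma pyRangeInt : ∀ (k : Nat),
    PySem.List.pyRange 1 ((k : Int) + 1) 1 = (List.range' 1 k).map (fun n : Nat => (n : Int)) := by
  intro k
  induction k with
  | zero =>
    simp only [Nat.cast_zero, zero_add, List.range'_zero, List.map_nil]
    apply List.eq_nil_iff_forall_not_mem.2
    intro x hx
    rw [PySem.List.mem_pyRange_one] at hx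
    omega
  | succ k ih =>
    have hcast : ((k + 1 : Nat) : Int) + 1 = ((k : Int) + 1) + 1 := by push_cast; ring
    rw [hcast, PySem.List.pyRange_one_succ_right (by omega), ih, List.range'_1_concat,
      List.map_append]
    simp
    omega

-- ---- the combinatorial heart: nodup + {1..k} ⊆ xs + |xs| = k  ↔  xs ~ [1..k] ----
lemma perm_range_iff (xs : List Int) (k : Nat) (hlen : xs.length = k) :
    (xs.Nodup ∧ ∀ i : Int, 0 ≤ i → i < (k : Int) → (i + 1) ∈ xs)
      ↔ xs.Perm ((List.range' 1 k).map (fun n : Nat => (n : Int))) := by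
  have hndR : ((List.range' 1 k).map (fun n : Nat => (n : Int))).Nodup := by
    refine List.Nodup.map ?_ (List.nodup_range' 1)
    intro a b h; exact Nat.cast_injective h
  constructor
  · rintro ⟨hnd, hmem⟩
    have hsub : ((List.range' 1 k).map (fun n : Nat => (n : Int))) ⊆ xs := by
      intro y hy
      rcases List.mem_map.1 hy with ⟨n, hn, rfl⟩
      rw [List.mem_range'_1] at hn
      have := hmem ((n : Int) - 1) (by omega) (by omega)
      simpa using this
    have hsp := List.subperm_of_subset hndR hsub
    have hl : xs.length ≤ ((List.range' 1 k).map (fun n : Nat => (n : Int))).length := by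
      simp [hlen]
    exact (hsp.perm_of_length_le hl).symm
  · intro hp
    refine ⟨hp.nodup_iff.2 hndR, ?_⟩
    intro i h0 hk
    rw [hp.mem_iff]
    refine List.mem_map.2 ⟨i.toNat + 1, ?_, by omega⟩
    rw [List.mem_range'_1]
    omega

-- ---- characterizations of the two ports ----
lemma solve_word_iff (word : String) :
    solve_word word = true ↔
      ((freshChars [] word.toList).map (fun c => (word.toList.count c : Int))).Perm
        ((List.range' 1 (freshChars [] word.toList).length).map (fun n : Nat => (n : Int))) := by
  have hne : ∀ c ∈ freshChars [] word.toList,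
      (PySem.Dict.empty : PySem.Dict String Char).contains
        (PySem.Int.toStr (word.toList.count c : Int)) = false :=
    fun c _ => PySem.Dict.contains_empty _
  have hinj : ∀ (x : Int), x ∈ (freshChars [] word.toList).map
        (fun c => (word.toList.count c : Int)) → 0 ≤ x := by
    intro x hx
    rcases List.mem_map.1 hx with ⟨c, -, rfl⟩
    positivity
  have hmm : (freshChars [] word.toList).map
        (fun c => PySem.Int.toStr (word.toList.count c : Int))
      = ((freshChars [] word.toList).map (fun c => (word.toList.count c : Int))).map
          PySem.Int.toStr := by
    rw [List.map_map]
    rfl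
  have hndiff : ((freshChars [] word.toList).map
        (fun c => PySem.Int.toStr (word.toList.count c : Int))).Nodup
      ↔ ((freshChars [] word.toList).map (fun c => (word.toList.count c : Int))).Nodup := by
    rw [hmm]
    constructor
    · exact List.Nodup.of_map _
    · intro h
      refine h.map_on ?_
      intro x hx y hy hxy
      exact toStr_nonneg_inj x y (hinj x hx) (hinj y hy) hxy
  simp only [solve_word, solveLoopA_eq_foldD, foldD_eq]
  by_cases hnd : ((freshChars [] word.toList).map
      (fun c => PySem.Int.toStr (word.toList.count c : Int))).Nodup
  · rw [if_pos ⟨hne, hnd⟩]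
    have hitems : ((freshChars [] word.toList).foldl
          (fun d c => d.insert (PySem.Int.toStr (word.toList.count c : Int)) c)
          PySem.Dict.empty).items
        = (freshChars [] word.toList).map
            (fun c => (PySem.Int.toStr (word.toList.count c : Int), c)) := by
      rw [PySem.Dict.items_foldl_insert_fresh _ _ _ _ hne hnd]
      rfl
    have hsize : ((freshChars [] word.toList).foldl
          (fun d c => d.insert (PySem.Int.toStr (word.toList.count c : Int)) c)
          PySem.Dict.empty).size = (freshChars [] word.toList).length := by
      simp [PySem.Dict.size, hitems]
    have hkeys : ((freshChars [] word.toList).foldl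
          (fun d c => d.insert (PySem.Int.toStr (word.toList.count c : Int)) c)
          PySem.Dict.empty).keys
        = (freshChars [] word.toList).map
            (fun c => PySem.Int.toStr (word.toList.count c : Int)) := by
      simp [PySem.Dict.keys, hitems]
    rw [← perm_range_iff _ _ (by simp)]
    have hmN : ((freshChars [] word.toList).map
        (fun c => (word.toList.count c : Int))).Nodup := hndiff.1 hnd
    simp only [hsize, PySem.List.pyRange_zero_natCast, List.all_eq_true]
    constructor
    · intro h
      refine ⟨hmN, ?_⟩
      intro i h0 hk
      have hmem : (i : Int) ∈ (List.range (freshChars [] word.toList).length).map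
          (fun j : Nat => (j : Int)) :=
        List.mem_map.2 ⟨i.toNat, List.mem_range.2 (by omega), by omega⟩
      have hc := h _ hmem
      rw [PySem.Dict.contains_iff_mem_keys, hkeys, hmm] at hc
      rcases List.mem_map.1 hc with ⟨x, hx, hxeq⟩
      have hxe : x = i + 1 := toStr_nonneg_inj x (i + 1) (hinj x hx) (by omega) hxeq
      exact hxe ▸ hx
    · rintro ⟨-, h⟩ y hy
      rcases List.mem_map.1 hy with ⟨j, hj, rfl⟩
      rw [PySem.Dict.contains_iff_mem_keys, hkeys, hmm]
      exact List.mem_map.2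
        ⟨_, h (j : Int) (by positivity) (by exact_mod_cast List.mem_range.1 hj), rfl⟩
  · rw [if_neg (fun hcontra => hnd hcontra.2)]
    simp only [Bool.false_eq_true, false_iff]
    intro hp
    exact hnd (hndiff.2 (hp.nodup_iff.2 (by
      refine List.Nodup.map ?_ (List.nodup_range' 1)
      intro a b h; exact Nat.cast_injective h)))

lemma solve_word_alt_iff (word : String) :
    solve_word_alt word = true ↔
      ((PySem.List.dedup word.toList).map (fun c => (word.toList.count c : Int))).Perm
        ((List.range' 1 (PySem.List.dedup word.toList).length).map (fun n : Nat => (n : Int))) := by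
  simp only [solve_word_alt, beq_iff_eq, PySem.List.length_sorted, List.length_map]
  rw [pyRangeInt]
  constructor
  · intro h
    have p1 := PySem.List.sorted_perm
      ((PySem.List.dedup word.toList).map (fun c => (word.toList.count c : Int)))
      (fun x => x) false
    rw [h] at p1
    exact p1.symm
  · intro h
    refine PySem.List.sorted_eq_of_perm_of_pairwise_lt _ _ _ h.symm ?_
    refine List.Pairwise.map _ ?_ (List.pairwise_lt_range' 1)
    intro a b hab
    exact_mod_cast hab

lemma fresh_perm_dedup (w : List Char) : (freshChars [] w).Perm (PySem.List.dedup w) := by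
  rw [List.perm_ext_iff_of_nodup (nodup_freshChars w []) (PySem.List.nodup_dedup w)]
  intro a
  rw [mem_freshChars, PySem.List.mem_dedup]
  simp

-- ===== VERDICT (by name: the statement is the Claim_ definition above) =====
theorem solve_word_spec : Claim_equal_solve_word := by
  intro word _
  unfold Spec_solve_word
  have hperm := fresh_perm_dedup word.toList
  have hmap := hperm.map (fun c => (word.toList.count c : Int))
  have hlen : (freshChars [] word.toList).length = (PySem.List.dedup word.toList).length :=
    hperm.length_eq
  have h1 := solve_word_iff word
  have h2 := solve_word_alt_iff word
  rw [hlen] at h1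
  have : solve_word word = true ↔ solve_word_alt word = true := by
    rw [h1, h2]
    constructor
    · intro h; exact (hmap.symm).trans h
    · intro h; exact hmap.trans h
  cases hA : solve_word word <;> cases hB : solve_word_alt word <;> simp_all
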